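-- pv_equiv track=rewrite | github.com/yezyvibe/Algorithm_PS | 실력확인/sktt1.py | solution
-- ===== SOURCE A (Python) =====
-- def solution(logs, events):
--     user_dict = {}
--     for i in range(len(logs)):
--         cur = logs[i].split(" ")
--         time, user, event = cur
--         if user not in user_dict:
--             user_dict[user] = [event]
--         else:
--             user_dict[user].append(event)
--
--     answer = []
--     for key, val in user_dict.items():
--         idx = 0
--         for i in range(len(val)):
--             if val[i] == events[idx]:
--                 idx += 1
--                 if idx == len(events):
--                     idx = 0
--             else:
--                 answer.append(key)
--                 break
--     answer.sort()
--     return answer if len(answer) > 0 else ["-1"]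
-- ===== SOURCE B (Python) =====
-- def solution(logs, events):
--     # One pass over logs: per-user cyclic index + set of already-broken users.
--     idx = {}
--     broken = set()
--     for log in logs:
--         _time, user, event = log.split(" ")
--         if user in broken:
--             continue
--         i = idx.get(user, 0)
--         if event == events[i]:
--             idx[user] = 0 if i + 1 == len(events) else i + 1
--         else:
--             broken.add(user)
--     return sorted(broken) if broken else ["-1"]
-- ===== Notes on version B (the rewrite author's own statement) =====
-- stated objective: alternative
-- what changed: B replaces A's group-by-user dict of full event lists plus a second rescanning loop by a single streaming pass that keeps only a per-user cyclic index and a set of already-broken users, so no per-user event lists are ever materialised.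
-- outside the precondition, e.g. on solution(['1 a x'], []): A raises IndexError, B raises IndexError; on solution(['1 a'], ['x']): A raises ValueError, B raises ValueError
import Mathlib
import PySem

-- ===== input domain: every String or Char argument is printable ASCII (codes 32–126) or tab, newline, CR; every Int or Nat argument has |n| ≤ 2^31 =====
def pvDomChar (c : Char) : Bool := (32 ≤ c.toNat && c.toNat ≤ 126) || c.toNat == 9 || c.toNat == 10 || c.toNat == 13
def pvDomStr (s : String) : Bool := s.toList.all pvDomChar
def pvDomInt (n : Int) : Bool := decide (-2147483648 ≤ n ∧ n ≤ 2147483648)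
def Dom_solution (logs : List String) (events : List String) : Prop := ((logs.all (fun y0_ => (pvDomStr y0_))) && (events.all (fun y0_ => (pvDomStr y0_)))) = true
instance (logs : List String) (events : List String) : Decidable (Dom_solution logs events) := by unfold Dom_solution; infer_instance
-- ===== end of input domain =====

-- B: single streaming pass keeping a per-user cyclic index and a broken-user set,
-- instead of A's group-by-user dict of event lists followed by a rescanning loop (alternative decomposition, same asymptotic cost).


-- ===== PORT A =====
-- user_dict built by the first loop of A (dict user -> list of its events, insertion order)
def aBuild (logs : List String) : PySem.Dict String (List String) :=
  logs.foldl (fun d log =>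
    match PySem.Str.split? log " " with
    | some [_time, user, event] =>
      if !d.contains user then d.insert user [event]
      else d.insert user (d.getD user [] ++ [event])
    | _ => d)   -- ValueError in Python (log does not split into 3 fields); excluded by Pre_
    PySem.Dict.empty

-- A's inner loop over a user's event list: returns true iff A appends the key (breaks)
def aScan (events : List String) : List String → Nat → Bool
  | [], _ => false
  | v :: rest, idx =>
    match PySem.List.pyGet? events (idx : Int) with
    | some ev =>
      if v = ev then
        aScan events rest (if idx + 1 = events.length then 0 else idx + 1)
      else true
    | none => false   -- IndexError in Python (events empty); excluded by Pre_

def solution (logs : List String) (events : List String) : List String :=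
  let user_dict := aBuild logs
  let answer := user_dict.items.foldl
    (fun ans kv => if aScan events kv.2 0 then ans ++ [kv.1] else ans) []
  let answer := PySem.List.sorted answer (fun x => x)
  if answer.length > 0 then answer else ["-1"]

-- ===== PORT B =====
-- one streaming step of B: state = (per-user cyclic index, set of broken users)
def bStep (events : List String) (st : PySem.Dict String Nat × PySem.Set String)
    (log : String) : PySem.Dict String Nat × PySem.Set String :=
  match PySem.Str.split? log " " with
  | some [_time, user, event] =>
    if st.2.contains user then st
    else
      let i := st.1.getD user 0
      match PySem.List.pyGet? events (i : Int) with
      | some ev =>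
        if event = ev then
          (st.1.insert user (if i + 1 = events.length then 0 else i + 1), st.2)
        else (st.1, st.2.add user)
      | none => st   -- IndexError in Python (events empty); excluded by Pre_
  | _ => st   -- ValueError in Python; excluded by Pre_

def solution_alt (logs : List String) (events : List String) : List String :=
  let st := logs.foldl (bStep events) (PySem.Dict.empty, PySem.Set.empty)
  if !st.2.isEmpty then PySem.List.sorted st.2 (fun x => x) else ["-1"]

-- ===== PRECONDITION & SPEC =====
-- Pre_ excludes exactly the inputs where the Python A raises: a log line that does not
-- split into 3 space-separated fields (ValueError on unpacking), and a non-empty logs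
-- list together with empty events (IndexError at events[0]).
def Pre_solution (logs : List String) (events : List String) : Prop :=
  (∀ s ∈ logs, ((PySem.Str.split? s " ").getD []).length = 3) ∧ (logs = [] ∨ events ≠ [])
instance (logs : List String) (events : List String) : Decidable (Pre_solution logs events) := by
  unfold Pre_solution; infer_instance

def pvWitness_solution : List String × List String := (["1 walk start", "2 walk start"], ["start", "end"])

def Spec_solution (logs : List String) (events : List String) (out : List String) : Prop := out = solution_alt logs events
instance (logs : List String) (events : List String) (out : List String) : Decidable (Spec_solution logs events out) := by unfold Spec_solution; infer_instance

-- ===== CLAIM (what is proved, stated in full; the proofs are below) =====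
def Claim_equal_solution : Prop := ∀ (logs : List String) (events : List String), Dom_solution logs events → Pre_solution logs events → Spec_solution logs events (solution logs events)

-- ===== LEMMAS AND PROOFS =====

-- (user, event) of a log line, when it has exactly 3 fields
def parse3 (s : String) : Option (String × String) :=
  match PySem.Str.split? s " " with
  | some [_t, u, e] => some (u, e)
  | _ => none

-- the event sequence of user u in logs, in order
def grp (logs : List String) (u : String) : List String :=
  ((logs.filterMap parse3).filter (fun p => p.1 = u)).map (·.2)

-- abstract cyclic matcher: (broke?, index after the matched prefix)
def runE (events : List String) : List String → Nat → Bool × Nat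
  | [], i => (false, i)
  | e :: r, i =>
    if e = events.getD i "" then
      runE events r (if i + 1 = events.length then 0 else i + 1)
    else (true, i)

theorem runE_snd_lt (events : List String) (h : 0 < events.length) :
    ∀ (g : List String) (i : Nat), i < events.length → (runE events g i).2 < events.length := by
  intro g
  induction g with
  | nil => intro i hi; simpa [runE] using hi
  | cons e r ih =>
    intro i hi
    by_cases h1 : e = events.getD i ""
    · simp only [runE, if_pos h1]
      exact ih _ (by split_ifs <;> omega)
    · simp only [runE, if_neg h1]; exact hi

theorem runE_append (events : List String) (g : List String) (e : String) (i : Nat) :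
    runE events (g ++ [e]) i =
      if (runE events g i).1 then runE events g i
      else if e = events.getD (runE events g i).2 "" then
        (false, if (runE events g i).2 + 1 = events.length then 0 else (runE events g i).2 + 1)
      else (true, (runE events g i).2) := by
  induction g generalizing i with
  | nil => simp [runE]
  | cons v r ih =>
    by_cases h1 : v = events.getD i ""
    · simp only [List.cons_append, runE, if_pos h1]
      exact ih _
    · simp only [List.cons_append, runE, if_neg h1]
      simp

theorem aScan_eq_runE (events : List String) :
    ∀ (g : List String) (i : Nat), i < events.length →
      aScan events g i = (runE events g i).1 := by
  intro g
  induction g with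
  | nil => intro i hi; simp [aScan, runE]
  | cons v r ih =>
    intro i hi
    have hg : PySem.List.pyGet? events (i : Int) = some (events.getD i "") := by
      simp [PySem.List.pyGet?_natCast, List.getD_eq_getElem?_getD, List.getElem?_eq_getElem hi]
    by_cases h1 : v = events.getD i ""
    · simp only [aScan, runE, hg, if_pos h1]
      exact ih _ (by split_ifs <;> omega)
    · simp only [aScan, runE, hg, if_neg h1]

theorem grp_append (logs : List String) (x : String) (u v e : String)
    (hx : parse3 x = some (u, e)) :
    grp (logs ++ [x]) v = grp logs v ++ (if v = u then [e] else []) := by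
  simp only [grp, List.filterMap_append, List.filter_append, List.map_append]
  congr 1
  have hfm : List.filterMap parse3 [x] = [(u, e)] := by simp [List.filterMap, hx]
  rw [hfm]
  by_cases h : v = u
  · simp [h]
  · simp [List.filter, show ¬ u = v from fun hh => h hh.symm, h]

theorem set_nodup_add (s : PySem.Set String) (x : String) (h : s.Nodup) : (s.add x).Nodup := by
  unfold PySem.Set.add
  split_ifs with hc
  · exact h
  · refine List.Nodup.append h (List.nodup_singleton x) ?_
    intro a ha hb
    simp at hb; subst hb
    exact absurd ((PySem.Set.contains_iff s a).mpr ha) (by simpa using hc)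

theorem main_inv (events : List String) (hev : events ≠ []) :
    ∀ (logs : List String), (∀ s ∈ logs, ((PySem.Str.split? s " ").getD []).length = 3) →
    (∀ u, (aBuild logs).get? u = if grp logs u = [] then none else some (grp logs u)) ∧
    (aBuild logs).keys.Nodup ∧
    (logs.foldl (bStep events) (PySem.Dict.empty, PySem.Set.empty)).2.Nodup ∧
    (∀ u, u ∈ (logs.foldl (bStep events) (PySem.Dict.empty, PySem.Set.empty)).2 ↔
      (runE events (grp logs u) 0).1 = true) ∧
    (∀ u, u ∉ (logs.foldl (bStep events) (PySem.Dict.empty, PySem.Set.empty)).2 →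
      (logs.foldl (bStep events) (PySem.Dict.empty, PySem.Set.empty)).1.getD u 0 =
        (runE events (grp logs u) 0).2) := by
  have hlen : 0 < events.length := List.length_pos_iff.mpr hev
  intro logs
  induction logs using List.reverseRecOn with
  | nil =>
    intro _
    refine ⟨?_, ?_, ?_, ?_, ?_⟩
    · intro u; simp [aBuild, grp, PySem.Dict.get?_empty]
    · simp [aBuild, PySem.Dict.keys_empty]
    · simp [PySem.Set.empty]
    · intro u; simp [PySem.Set.empty, grp, runE]
    · intro u _; simp [grp, runE, PySem.Dict.getD_empty]
  | append_singleton L x ih =>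
    intro H
    have HL : ∀ s ∈ L, ((PySem.Str.split? s " ").getD []).length = 3 :=
      fun s hs => H s (List.mem_append_left _ hs)
    obtain ⟨hA, hAnd, hBnd, hmem, hidx⟩ := ih HL
    -- x parses into 3 fields
    have hx3 : ((PySem.Str.split? x " ").getD []).length = 3 := H x (by simp)
    obtain ⟨t, u, e, hsplit⟩ : ∃ t u e, PySem.Str.split? x " " = some [t, u, e] := by
      rcases hq : PySem.Str.split? x " " with _ | l
      · rw [hq] at hx3; simp at hx3
      · rw [hq] at hx3; simp at hx3
        match l, hx3 with
        | [a, b, c], _ => exact ⟨a, b, c, rfl⟩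
    have hp : parse3 x = some (u, e) := by simp [parse3, hsplit]
    have hgrp : ∀ v, grp (L ++ [x]) v = grp L v ++ (if v = u then [e] else []) :=
      fun v => grp_append L x u v e hp
    -- A's dict after one more log
    have hAstep : aBuild (L ++ [x]) = (aBuild L).insert u (grp L u ++ [e]) := by
      have h1 : aBuild (L ++ [x]) =
          (match PySem.Str.split? x " " with
           | some [_time, user, event] =>
             if !(aBuild L).contains user then (aBuild L).insert user [event]
             else (aBuild L).insert user ((aBuild L).getD user [] ++ [event])
           | _ => aBuild L) := by
        unfold aBuild; rw [List.foldl_append]; rfl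
      rw [h1, hsplit]
      by_cases hg : grp L u = []
      · have hc : (aBuild L).contains u = false := by
          rw [PySem.Dict.contains_eq_isSome_get?, hA u, if_pos hg]; rfl
        simp [hc, hg]
      · have hc : (aBuild L).contains u = true := by
          rw [PySem.Dict.contains_eq_isSome_get?, hA u, if_neg hg]; rfl
        have hgd : (aBuild L).getD u [] = grp L u := by
          unfold PySem.Dict.getD; rw [hA u, if_neg hg]; rfl
        simp [hc, hgd]
    -- B's state after one more log
    have hBstep : (L ++ [x]).foldl (bStep events) (PySem.Dict.empty, PySem.Set.empty) =
        bStep events (L.foldl (bStep events) (PySem.Dict.empty, PySem.Set.empty)) x := by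
      rw [List.foldl_append]; rfl
    set st := L.foldl (bStep events) (PySem.Dict.empty, PySem.Set.empty) with hst
    have hAget : ∀ v, (aBuild (L ++ [x])).get? v =
        if grp (L ++ [x]) v = [] then none else some (grp (L ++ [x]) v) := by
      intro v
      rw [hAstep, PySem.Dict.get?_insert, hgrp v]
      by_cases hv : v = u
      · simp [hv]
      · simp [hv, hA v]
    have hAnd' : (aBuild (L ++ [x])).keys.Nodup := by
      rw [hAstep]; exact PySem.Dict.nodup_keys_insert _ _ _ hAnd
    by_cases hu : st.2.contains u = true
    · -- u is already broken: B's state is unchanged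
      have hstep : bStep events st x = st := by
        unfold bStep; rw [hsplit]; simp only [hu, if_true]
      rw [hBstep, hstep]
      have humem : u ∈ st.2 := (PySem.Set.contains_iff _ _).mp hu
      have hrun_u : (runE events (grp L u) 0).1 = true := (hmem u).mp humem
      refine ⟨hAget, hAnd', hBnd, ?_, ?_⟩
      · intro v
        rw [hgrp v]
        by_cases hv : v = u
        · subst hv
          rw [if_pos rfl, runE_append, hrun_u, if_pos rfl]
          exact hmem v
        · rw [if_neg hv, List.append_nil]; exact hmem v
      · intro v hv
        have hvu : v ≠ u := fun hh => hv (hh ▸ humem)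
        rw [hgrp v]
        rw [if_neg hvu, List.append_nil]; exact hidx v hv
    · -- u is not broken yet
      have humem : u ∉ st.2 := fun hm => hu ((PySem.Set.contains_iff _ _).mpr hm)
      have hrun_u : (runE events (grp L u) 0).1 = false := by
        cases hq : (runE events (grp L u) 0).1
        · rfl
        · exact absurd ((hmem u).mpr hq) humem
      have hi_eq : st.1.getD u 0 = (runE events (grp L u) 0).2 := hidx u humem
      have hilt : st.1.getD u 0 < events.length := by
        rw [hi_eq]; exact runE_snd_lt events hlen _ 0 hlen
      have hget : PySem.List.pyGet? events ((st.1.getD u 0 : Nat) : Int) =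
          some (events.getD (st.1.getD u 0) "") := by
        simp [PySem.List.pyGet?_natCast, List.getD_eq_getElem?_getD, List.getElem?_eq_getElem hilt]
      by_cases he : e = events.getD (st.1.getD u 0) ""
      · -- the event matches: index advances cyclically
        have hstep : bStep events st x =
            (st.1.insert u (if st.1.getD u 0 + 1 = events.length then 0 else st.1.getD u 0 + 1),
             st.2) := by
          unfold bStep; rw [hsplit]; simp only [hget, if_neg hu]
          rw [if_pos he]
        have hrun_app : runE events (grp L u ++ [e]) 0 =
            (false, if st.1.getD u 0 + 1 = events.length then 0 else st.1.getD u 0 + 1) := by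
          rw [runE_append, hrun_u]
          simp only [Bool.false_eq_true, if_false, ← hi_eq, if_pos he]
        rw [hBstep, hstep]
        refine ⟨hAget, hAnd', hBnd, ?_, ?_⟩
        · intro v
          rw [hgrp v]
          by_cases hv : v = u
          · subst hv
            rw [if_pos rfl, hrun_app]
            constructor
            · intro hm; exact absurd hm humem
            · intro hf; exact absurd hf (by simp)
          · rw [if_neg hv, List.append_nil]; exact hmem v
        · intro v hv
          rw [hgrp v]
          by_cases hv2 : v = u
          · subst hv2
            rw [if_pos rfl, hrun_app, PySem.Dict.getD_insert_self]
          · rw [if_neg hv2, List.append_nil, PySem.Dict.getD_insert_of_ne _ _ _ hv2]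
            exact hidx v hv
      · -- the event does not match: u becomes broken
        have hstep : bStep events st x = (st.1, st.2.add u) := by
          unfold bStep; rw [hsplit]; simp only [hget, if_neg hu]
          rw [if_neg he]
        have hrun_app : runE events (grp L u ++ [e]) 0 = (true, (runE events (grp L u) 0).2) := by
          rw [runE_append, hrun_u]
          simp only [Bool.false_eq_true, if_false, ← hi_eq, if_neg he]
        rw [hBstep, hstep]
        refine ⟨hAget, hAnd', set_nodup_add _ _ hBnd, ?_, ?_⟩
        · intro v
          rw [hgrp v, PySem.Set.mem_add]
          by_cases hv : v = u
          · subst hv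
            simp [hrun_app]
          · rw [if_neg hv, List.append_nil]
            simp only [hv, or_false]
            exact hmem v
        · intro v hv
          rw [PySem.Set.mem_add] at hv
          have hv1 : v ∉ st.2 := fun h => hv (Or.inl h)
          have hv2 : v ≠ u := fun h => hv (Or.inr h)
          rw [hgrp v, if_neg hv2, List.append_nil]
          exact hidx v hv1


-- ===== VERDICT (by name: the statement is the Claim_ definition above) =====
theorem solution_spec : Claim_equal_solution := by
  unfold Claim_equal_solution
  intro logs events _ hpre
  unfold Spec_solution
  obtain ⟨H3, hor⟩ := hpre
  rcases hor with hl | hev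
  · subst hl; rfl
  · have hlen : 0 < events.length := List.length_pos_iff.mpr hev
    obtain ⟨hA, hAnd, hBnd, hmem, hidx⟩ := main_inv events hev logs H3
    have hitems : (aBuild logs).items =
        (aBuild logs).keys.map (fun k => (k, (aBuild logs).getD k [])) :=
      PySem.Dict.items_eq_map_keys _ hAnd []
    have hgd : ∀ k, (aBuild logs).getD k [] = grp logs k := by
      intro k
      unfold PySem.Dict.getD
      rw [hA k]
      by_cases hg : grp logs k = [] <;> simp [hg]
    have hans : (aBuild logs).items.foldl
        (fun ans kv => if aScan events kv.2 0 then ans ++ [kv.1] else ans) [] =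
        (aBuild logs).keys.filter (fun k => aScan events (grp logs k) 0) := by
      rw [PySem.List.foldl_append_if (fun kv => aScan events kv.2 0) (fun kv => kv.1)
        (aBuild logs).items []]
      rw [hitems, List.filter_map, List.map_map]
      simp [Function.comp_def, hgd]
    set st := logs.foldl (bStep events) (PySem.Dict.empty, PySem.Set.empty) with hst
    set ans := (aBuild logs).keys.filter (fun k => aScan events (grp logs k) 0) with hansdef
    have hansnd : ans.Nodup := hAnd.filter _
    have hansmem : ∀ v, v ∈ ans ↔ v ∈ st.2 := by
      intro v
      rw [hansdef, List.mem_filter]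
      constructor
      · rintro ⟨_, hsc⟩
        rw [aScan_eq_runE events _ 0 hlen] at hsc
        exact (hmem v).mpr hsc
      · intro hb
        have hr := (hmem v).mp hb
        have hgne : grp logs v ≠ [] := by
          intro h0; rw [h0] at hr; simp [runE] at hr
        have hk : v ∈ (aBuild logs).keys := by
          by_contra hnk
          have := (PySem.Dict.get?_eq_none_iff_not_mem_keys (aBuild logs) v).mpr hnk
          rw [hA v, if_neg hgne] at this
          cases this
        exact ⟨hk, by rw [aScan_eq_runE events _ 0 hlen]; exact hr⟩
    have hperm : ans.Perm st.2 := (List.perm_ext_iff_of_nodup hansnd hBnd).mpr hansmem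
    have hsorted : PySem.List.sorted ans (fun x => x) = PySem.List.sorted st.2 (fun x => x) :=
      PySem.List.sorted_eq_sorted_of_perm _ _ _ (fun _ _ h => h) hperm
    show (if (PySem.List.sorted ((aBuild logs).items.foldl
        (fun ans kv => if aScan events kv.2 0 then ans ++ [kv.1] else ans) []) (fun x => x)).length > 0
      then PySem.List.sorted ((aBuild logs).items.foldl
        (fun ans kv => if aScan events kv.2 0 then ans ++ [kv.1] else ans) []) (fun x => x)
      else ["-1"]) =
      (if !st.2.isEmpty then PySem.List.sorted st.2 (fun x => x) else ["-1"])
    rw [hans, hsorted, PySem.List.length_sorted]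
    have hlength : ans.length = st.2.length := hperm.length_eq
    by_cases hz : st.2 = []
    · have hansnil : ans = [] := List.length_eq_zero_iff.mp (by rw [hlength, hz]; rfl)
      rw [hz] at hsorted ⊢
      simp
    · have h0 : 0 < st.2.length := List.length_pos_iff.mpr hz
      rw [if_pos (by omega : st.2.length > 0), if_pos (by simp [hz])]
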